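-- pv_equiv track=rewrite | github.com/LuBieS2/22maja2023r_nowa | 22maja2023r_nowa/_22maja2023r_nowa.py | wczytaj_ciagi
-- ===== SOURCE A (Python) =====
-- def wczytaj_ciagi(liczby):
--     i=0
--     tablice=[]
--     while i<=len(liczby)-6:
--         tablice.append([])
--         for j in range(6):
--             tablice[i].append(liczby[j+i])
--         i+=1
--     return tablice
-- ===== SOURCE B (Python) =====
-- def wczytaj_ciagi(liczby):
--     return [list(w) for w in zip(*[liczby[k:] for k in range(6)])]
-- ===== Notes on version B (the rewrite author's own statement) =====
-- stated objective: idiomatic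
-- what changed: Replaces the index-counting while loop with nested appends by a transposition: zip six shifted slices and listify each tuple.
import Mathlib
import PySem

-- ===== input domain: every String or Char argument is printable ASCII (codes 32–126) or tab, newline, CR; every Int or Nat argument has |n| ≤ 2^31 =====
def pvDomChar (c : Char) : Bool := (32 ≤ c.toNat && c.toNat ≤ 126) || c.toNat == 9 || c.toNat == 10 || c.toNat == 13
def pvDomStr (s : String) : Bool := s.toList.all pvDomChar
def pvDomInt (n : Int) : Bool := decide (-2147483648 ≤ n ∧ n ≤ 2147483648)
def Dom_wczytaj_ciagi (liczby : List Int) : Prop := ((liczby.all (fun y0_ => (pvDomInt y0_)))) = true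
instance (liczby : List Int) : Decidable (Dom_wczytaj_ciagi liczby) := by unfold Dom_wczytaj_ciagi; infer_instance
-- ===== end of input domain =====

-- B replaces A's index-counting while loop by a transposition (zip of six shifted slices); objective: idiomatic, same cost.


-- ===== PORT A =====
-- while i <= len(liczby)-6 counting i by 1 from 0 is iterated as i over range(0, len-6+1);
-- liczby[j+i] is always in range here, so pyGetD with default 0 is exact.
def wczytaj_ciagi (liczby : List Int) : List (List Int) :=
  (PySem.List.pyRange 0 ((liczby.length : Int) - 6 + 1) 1).foldl
    (fun tablice i =>
      tablice ++ [(PySem.List.pyRange 0 6 1).foldl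
        (fun row j => row ++ [PySem.List.pyGetD liczby (j + i) 0]) []])
    []

-- ===== PORT B =====
-- zip(*rows) for the six shifted slices, truncating at the shortest; list(w) is the 6-tuple as a list.
def pvZip6 {α : Type} : List α → List α → List α → List α → List α → List α → List (List α)
  | a :: as, b :: bs, c :: cs, d :: ds, e :: es, f :: fs =>
      [a, b, c, d, e, f] :: pvZip6 as bs cs ds es fs
  | _, _, _, _, _, _ => []

def wczytaj_ciagi_alt (liczby : List Int) : List (List Int) :=
  pvZip6 (PySem.List.slice liczby (some 0) none) (PySem.List.slice liczby (some 1) none)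
    (PySem.List.slice liczby (some 2) none) (PySem.List.slice liczby (some 3) none)
    (PySem.List.slice liczby (some 4) none) (PySem.List.slice liczby (some 5) none)

-- ===== PRECONDITION & SPEC =====
def Spec_wczytaj_ciagi (liczby : List Int) (out : List (List Int)) : Prop := out = wczytaj_ciagi_alt liczby
instance (liczby : List Int) (out : List (List Int)) : Decidable (Spec_wczytaj_ciagi liczby out) := by unfold Spec_wczytaj_ciagi; infer_instance

-- ===== CLAIM (what is proved, stated in full; the proofs are below) =====
def Claim_equal_wczytaj_ciagi : Prop := ∀ (liczby : List Int), Dom_wczytaj_ciagi liczby → Spec_wczytaj_ciagi liczby (wczytaj_ciagi liczby)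

-- ===== LEMMAS AND PROOFS =====

-- the i-th window, as A builds it
def pvWin (l : List Int) (k : Nat) : List Int :=
  [l.getD k 0, l.getD (k+1) 0, l.getD (k+2) 0, l.getD (k+3) 0, l.getD (k+4) 0, l.getD (k+5) 0]

lemma a_eq_rangeMap (l : List Int) :
    wczytaj_ciagi l = (List.range ((l.length : Int) - 5).toNat).map (pvWin l) := by
  unfold wczytaj_ciagi
  simp only [PySem.List.foldl_append_singleton_eq_map]
  have h6 : PySem.List.pyRange 0 6 1 = [0, 1, 2, 3, 4, 5] := by decide
  rw [h6, PySem.List.pyRange_one]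
  rw [List.map_map]
  simp only [List.nil_append]
  rw [show ((l.length : Int) - 6 + 1 - 0).toNat = ((l.length : Int) - 5).toNat by omega]
  apply List.map_congr_left
  intro k hk
  simp only [List.mem_range] at hk
  have key : ∀ (c : Int) (j : Nat), c = (j : Int) →
      PySem.List.pyGetD l (c + (k : Int)) 0 = l.getD (k + j) 0 := by
    rintro c j rfl
    rw [show ((j : Int) + (k : Int)) = ((k + j : Nat) : Int) by push_cast; ring,
        PySem.List.pyGetD_natCast]
  simp only [Function.comp, List.map_cons, List.map_nil, zero_add, pvWin]
  rw [key 1 1 (by norm_num), key 2 2 (by norm_num),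
      key 3 3 (by norm_num), key 4 4 (by norm_num), key 5 5 (by norm_num)]
  simp

lemma rangeMap_eq_zip6 (l : List Int) :
    (List.range ((l.length : Int) - 5).toNat).map (pvWin l) =
      pvZip6 l (l.drop 1) (l.drop 2) (l.drop 3) (l.drop 4) (l.drop 5) := by
  induction l with
  | nil => simp [pvZip6]
  | cons x t ih =>
    rcases t with _ | ⟨a, t⟩
    · simp [pvZip6]
    rcases t with _ | ⟨b, t⟩
    · simp [pvZip6]
    rcases t with _ | ⟨c, t⟩
    · simp [pvZip6]
    rcases t with _ | ⟨d, t⟩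
    · simp [pvZip6]
    rcases t with _ | ⟨e, t⟩
    · simp [pvZip6]
    -- now the list has at least six elements
    have hlen : (((x :: a :: b :: c :: d :: e :: t).length : Int) - 5).toNat =
        (((a :: b :: c :: d :: e :: t).length : Int) - 5).toNat + 1 := by
      simp; omega
    rw [hlen, List.range_succ_eq_map, List.map_cons, List.map_map]
    have hwin : ∀ k : Nat, pvWin (x :: a :: b :: c :: d :: e :: t) (k + 1) =
        pvWin (a :: b :: c :: d :: e :: t) k := by
      intro k; simp [pvWin]
    have hmap : (List.range (((a :: b :: c :: d :: e :: t).length : Int) - 5).toNat).map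
        (pvWin (x :: a :: b :: c :: d :: e :: t) ∘ Nat.succ) =
        (List.range (((a :: b :: c :: d :: e :: t).length : Int) - 5).toNat).map
        (pvWin (a :: b :: c :: d :: e :: t)) := by
      apply List.map_congr_left
      intro k _
      simpa [Function.comp] using hwin k
    rw [hmap, ih]
    simp [pvZip6, pvWin]

lemma alt_eq_zip6 (l : List Int) :
    wczytaj_ciagi_alt l = pvZip6 l (l.drop 1) (l.drop 2) (l.drop 3) (l.drop 4) (l.drop 5) := by
  unfold wczytaj_ciagi_alt
  rw [show (0 : Int) = ((0 : Nat) : Int) by norm_num, PySem.List.slice_from_natCast]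
  rw [show (1 : Int) = ((1 : Nat) : Int) by norm_num, PySem.List.slice_from_natCast]
  rw [show (2 : Int) = ((2 : Nat) : Int) by norm_num, PySem.List.slice_from_natCast]
  rw [show (3 : Int) = ((3 : Nat) : Int) by norm_num, PySem.List.slice_from_natCast]
  rw [show (4 : Int) = ((4 : Nat) : Int) by norm_num, PySem.List.slice_from_natCast]
  rw [show (5 : Int) = ((5 : Nat) : Int) by norm_num, PySem.List.slice_from_natCast]
  simp

-- ===== VERDICT (by name: the statement is the Claim_ definition above) =====
theorem wczytaj_ciagi_spec : Claim_equal_wczytaj_ciagi := by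
  intro l _
  unfold Spec_wczytaj_ciagi
  rw [a_eq_rangeMap, rangeMap_eq_zip6, alt_eq_zip6]
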